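-- pv_equiv track=rewrite | github.com/Stardust-hyx/Generative_Text2DT | Seq2seq_AugNL/utils/functions.py | is_completed
-- ===== SOURCE A (Python) =====
-- def is_completed(tree, start):
--     if start >= len(tree):
--         return False, start
--
--     if tree[start]['role'] == 'D':
--         return True, start
--
--     elif tree[start]['role'] == 'C':
--         left_flag, left_end = is_completed(tree, start+1)
--         right_flag, right_end = is_completed(tree, left_end+1)
--
--         flag = left_flag and right_flag
--         return flag, right_end
-- ===== SOURCE B (Python) =====
-- def is_completed(tree, start):
--     # Iterative preorder parse: a pending-subtree counter replaces the recursion.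
--     pending = 1
--     i = start
--     flag = True
--     last = start
--     while pending > 0:
--         last = i
--         if i >= len(tree):
--             flag = False
--         elif tree[i]['role'] == 'C':
--             pending += 2
--         elif tree[i]['role'] != 'D':
--             flag = False
--         pending -= 1
--         i += 1
--     return flag, last
-- ===== Notes on version B (the rewrite author's own statement) =====
-- stated objective: alternative
-- what changed: Replaces A's nested recursion over subtrees by a single flat loop over the preorder list that keeps a pending-subtree counter, a running AND flag and the last index visited.
-- outside the precondition, e.g. on is_completed([{'role': 'X'}], 0): A returns None, B returns (False, 0); on is_completed([{'role': 'C'}, {'role': 'X'}, {'role': 'D'}], 0): A raises TypeError, B returns (False, 2)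
import Mathlib
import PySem

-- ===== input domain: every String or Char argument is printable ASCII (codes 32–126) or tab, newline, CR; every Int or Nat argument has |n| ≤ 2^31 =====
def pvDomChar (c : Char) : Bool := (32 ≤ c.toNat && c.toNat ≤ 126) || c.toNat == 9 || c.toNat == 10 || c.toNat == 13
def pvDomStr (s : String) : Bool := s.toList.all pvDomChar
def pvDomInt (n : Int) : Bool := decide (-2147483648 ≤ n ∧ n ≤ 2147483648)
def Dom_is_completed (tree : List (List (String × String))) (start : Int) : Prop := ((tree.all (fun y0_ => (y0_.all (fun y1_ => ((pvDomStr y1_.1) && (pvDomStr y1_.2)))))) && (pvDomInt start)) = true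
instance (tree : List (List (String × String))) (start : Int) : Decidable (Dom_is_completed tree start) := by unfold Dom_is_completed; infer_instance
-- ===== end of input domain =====

-- B replaces A's nested recursion over subtrees by a single flat loop over the preorder list with a
-- pending-subtree counter and a running AND flag (objective: alternative decomposition).

-- shared accessor: tree[i]['role']; the defaults are only reached outside Pre_
-- (Python raises IndexError/KeyError there).
def pvRoleAt (tree : List (List (String × String))) (i : Int) : String :=
  (((PySem.List.pyGet? tree i).getD []).lookup "role").getD ""

-- ===== PORT A =====
-- literal transliteration of A's recursion; `fuel` is only a structural totality
-- guard — with the fuel supplied below the 0 branch is never reached.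
def isCompletedGo (tree : List (List (String × String))) (fuel : Nat) (start : Int) :
    Bool × Int :=
  match fuel with
  | 0 => (false, start)
  | fuel + 1 =>
    if (tree.length : Int) ≤ start then (false, start)
    else if pvRoleAt tree start = "D" then (true, start)
    else if pvRoleAt tree start = "C" then
      let l := isCompletedGo tree fuel (start + 1)
      let r := isCompletedGo tree fuel (l.2 + 1)
      (l.1 && r.1, r.2)
    else
      -- Python returns None here (no value of the declared type); outside Pre_.
      (false, start)

def is_completed (tree : List (List (String × String))) (start : Int) : Bool × Int :=
  isCompletedGo tree (((tree.length : Int) - start).toNat + 1) start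

-- ===== PORT B =====
-- literal transliteration of B's while-loop (pending counter, running flag, last
-- index); `fuel` is only a structural totality guard, never reached as 0.
def altGo (tree : List (List (String × String))) (fuel : Nat) (pending i : Int)
    (flag : Bool) (last : Int) : Bool × Int :=
  match fuel with
  | 0 => (flag, last)
  | fuel + 1 =>
    if 0 < pending then
      -- last = i; the branch chain; pending -= 1; i += 1
      if (tree.length : Int) ≤ i then altGo tree fuel (pending - 1) (i + 1) false i
      else if pvRoleAt tree i = "C" then altGo tree fuel (pending + 1) (i + 1) flag i
      else if pvRoleAt tree i = "D" then altGo tree fuel (pending - 1) (i + 1) flag i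
      else altGo tree fuel (pending - 1) (i + 1) false i
    else (flag, last)

def is_completed_alt (tree : List (List (String × String))) (start : Int) : Bool × Int :=
  altGo tree (2 * ((tree.length : Int) - start).toNat + 2) 1 start true start

-- ===== PRECONDITION & SPEC =====
-- Pre_ excludes inputs where A raises (IndexError for start < -len(tree), KeyError for a
-- reached node without a 'role' key, TypeError from a nested unknown role) or returns
-- None instead of a pair (unknown role at the top level); for a simple closed form it
-- requires every node's role to be 'D' or 'C' (unless start is past the end or the start
-- node is a 'D' leaf), so it also drops some trees A parses while never reaching a
-- malformed node — there A and B agree (see cites).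
def Pre_is_completed (tree : List (List (String × String))) (start : Int) : Prop :=
  (tree.length : Int) ≤ start
  ∨ ((PySem.List.pyGet? tree start).bind (fun node => node.lookup "role")) = some "D"
  ∨ (-(tree.length : Int) ≤ start ∧
      ∀ node ∈ tree, node.lookup "role" = some "D" ∨ node.lookup "role" = some "C")
instance (tree : List (List (String × String))) (start : Int) :
    Decidable (Pre_is_completed tree start) := by unfold Pre_is_completed; infer_instance

def pvWitness_is_completed : (List (List (String × String))) × Int :=
  ([[("role", "C")], [("role", "D")], [("role", "D")]], 0)

def Spec_is_completed (tree : List (List (String × String))) (start : Int) (out : Bool × Int) : Prop := out = is_completed_alt tree start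
instance (tree : List (List (String × String))) (start : Int) (out : Bool × Int) : Decidable (Spec_is_completed tree start out) := by unfold Spec_is_completed; infer_instance

-- ===== CLAIM (what is proved, stated in full; the proofs are below) =====
def Claim_equal_is_completed : Prop := ∀ (tree : List (List (String × String))) (start : Int), Dom_is_completed tree start → Pre_is_completed tree start → Spec_is_completed tree start (is_completed tree start)

-- ===== LEMMAS AND PROOFS =====

-- A's recursion never moves the end index before its start.
lemma goA_ge (tree : List (List (String × String))) :
    ∀ fuel : Nat, ∀ i : Int, i ≤ (isCompletedGo tree fuel i).2 := by
  intro fuel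
  induction fuel with
  | zero => intro i; simp [isCompletedGo]
  | succ fuel ih =>
    intro i
    simp only [isCompletedGo]
    split_ifs with h1 h2 h3
    · simp
    · simp
    · have a1 := ih (i + 1)
      have a2 := ih ((isCompletedGo tree fuel (i + 1)).2 + 1)
      simp only []
      omega
    · simp

-- B's loop ignores extra fuel once it has enough to run to completion.
lemma altGo_fuel (tree : List (List (String × String))) :
    ∀ f1 : Nat, ∀ f2 : Nat, ∀ pending i : Int, ∀ flag : Bool, ∀ last : Int,
      0 ≤ pending →
      pending + 2 * ((((tree.length : Int) - i).toNat : Int)) < (f1 : Int) →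
      pending + 2 * ((((tree.length : Int) - i).toNat : Int)) < (f2 : Int) →
      altGo tree f1 pending i flag last = altGo tree f2 pending i flag last := by
  intro f1
  induction f1 with
  | zero => intro f2 pending i flag last hp h1 h2; exfalso; omega
  | succ f1 ih =>
    intro f2 pending i flag last hp h1 h2
    cases f2 with
    | zero => exfalso; omega
    | succ f2 =>
      by_cases hpend : 0 < pending
      · by_cases hlen : (tree.length : Int) ≤ i
        · have hz : ((tree.length : Int) - i).toNat = 0 := by omega
          have hz' : ((tree.length : Int) - (i + 1)).toNat = 0 := by omega
          simp only [altGo, if_pos hpend, if_pos hlen]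
          exact ih f2 (pending - 1) (i + 1) false i (by omega)
            (by rw [hz']; push_cast; omega) (by rw [hz']; push_cast; omega)
        · have hstep : ((tree.length : Int) - (i + 1)).toNat
              = ((tree.length : Int) - i).toNat - 1 := by omega
          have hpos : 1 ≤ ((tree.length : Int) - i).toNat := by omega
          by_cases hC : pvRoleAt tree i = "C"
          · simp only [altGo, if_pos hpend, if_neg hlen, if_pos hC]
            exact ih f2 (pending + 1) (i + 1) flag i (by omega)
              (by rw [hstep]; push_cast [hpos]; omega) (by rw [hstep]; push_cast [hpos]; omega)
          · by_cases hD : pvRoleAt tree i = "D"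
            · simp only [altGo, if_pos hpend, if_neg hlen, if_neg hC, if_pos hD]
              exact ih f2 (pending - 1) (i + 1) flag i (by omega)
                (by rw [hstep]; push_cast [hpos]; omega) (by rw [hstep]; push_cast [hpos]; omega)
            · simp only [altGo, if_pos hpend, if_neg hlen, if_neg hC, if_neg hD]
              exact ih f2 (pending - 1) (i + 1) false i (by omega)
                (by rw [hstep]; push_cast [hpos]; omega) (by rw [hstep]; push_cast [hpos]; omega)
      · simp only [altGo, if_neg hpend]

lemma role_good {tree : List (List (String × String))} {i : Int}
    (good : ∀ node ∈ tree, node.lookup "role" = some "D" ∨ node.lookup "role" = some "C")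
    (hlo : -(tree.length : Int) ≤ i) (hhi : ¬ (tree.length : Int) ≤ i) :
    pvRoleAt tree i = "D" ∨ pvRoleAt tree i = "C" := by
  obtain ⟨node, hnode⟩ : ∃ node, PySem.List.pyGet? tree i = some node := by
    cases h : PySem.List.pyGet? tree i with
    | some node => exact ⟨node, rfl⟩
    | none =>
      rw [PySem.List.pyGet?_eq_none_iff] at h
      exact absurd (by unfold PySem.Raise.InRange; omega : PySem.Raise.InRange tree.length i) h
  have hmem := PySem.List.mem_of_pyGet?_eq_some tree hnode
  rcases good node hmem with h | h <;> [left; right] <;>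
    simp [pvRoleAt, hnode, h]

-- the loop with pending+1 subtrees to close first parses one subtree (= A's recursion),
-- ANDs its flag in, and continues after its end with pending subtrees left.
lemma altGo_step (tree : List (List (String × String)))
    (good : ∀ node ∈ tree, node.lookup "role" = some "D" ∨ node.lookup "role" = some "C") :
    ∀ fA : Nat, ∀ i : Int, -(tree.length : Int) ≤ i →
      (((tree.length : Int) - i).toNat : Int) < (fA : Int) →
    ∀ fB : Nat, ∀ pending : Int, ∀ flag : Bool, ∀ last : Int, 0 ≤ pending →
      (pending + 1) + 2 * ((((tree.length : Int) - i).toNat : Int)) < (fB : Int) →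
    ∀ g : Nat,
      pending + 2 * ((((tree.length : Int) - ((isCompletedGo tree fA i).2 + 1)).toNat : Int)) < (g : Int) →
      altGo tree fB (pending + 1) i flag last =
        altGo tree g pending ((isCompletedGo tree fA i).2 + 1)
          (flag && (isCompletedGo tree fA i).1) (isCompletedGo tree fA i).2 := by
  intro fA
  induction fA with
  | zero => intro i hlo hfa; exfalso; omega
  | succ fA ih =>
    intro i hlo hfa fB pending flag last hp hfb g hg
    have hpend : (0 : Int) < pending + 1 := by omega
    obtain ⟨fB', rfl⟩ : ∃ fB', fB = fB' + 1 := by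
      cases fB with
      | zero => exfalso; omega
      | succ n => exact ⟨n, rfl⟩
    by_cases hlen : (tree.length : Int) ≤ i
    · have hA : isCompletedGo tree (fA + 1) i = (false, i) := by
        simp [isCompletedGo, hlen]
      rw [hA] at hg ⊢
      dsimp only at hg ⊢
      simp only [altGo, if_pos hpend, if_pos hlen, Bool.and_false,
        show pending + 1 - 1 = pending from by ring]
      exact altGo_fuel tree fB' g pending (i + 1) false i hp (by omega) (by omega)
    · rcases role_good good hlo hlen with hD | hC
      · have hDC : pvRoleAt tree i ≠ "C" := by simp [hD]
        have hA : isCompletedGo tree (fA + 1) i = (true, i) := by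
          simp [isCompletedGo, hlen, hD]
        rw [hA] at hg ⊢
        dsimp only at hg ⊢
        simp only [altGo, if_pos hpend, if_pos hD, if_neg hlen, if_neg hDC, Bool.and_true,
          show pending + 1 - 1 = pending from by ring]
        exact altGo_fuel tree fB' g pending (i + 1) flag i hp (by omega) (by omega)
      · have hA : isCompletedGo tree (fA + 1) i =
            ((isCompletedGo tree fA (i + 1)).1 &&
              (isCompletedGo tree fA ((isCompletedGo tree fA (i + 1)).2 + 1)).1,
             (isCompletedGo tree fA ((isCompletedGo tree fA (i + 1)).2 + 1)).2) := by
          simp [isCompletedGo, hlen, hC]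
        have hl2 : i + 1 ≤ (isCompletedGo tree fA (i + 1)).2 := goA_ge tree fA (i + 1)
        have hr2 : (isCompletedGo tree fA (i + 1)).2 + 1 ≤
            (isCompletedGo tree fA ((isCompletedGo tree fA (i + 1)).2 + 1)).2 :=
          goA_ge tree fA ((isCompletedGo tree fA (i + 1)).2 + 1)
        rw [hA] at hg ⊢
        dsimp only at hg ⊢
        simp only [altGo, if_pos hpend, if_pos hC, if_neg hlen]
        have e1 : pending + 1 + 1 = (pending + 1) + 1 := by ring
        rw [e1, ih (i + 1) (by omega) (by omega) fB' (pending + 1) flag i (by omega)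
              (by omega) fB' (by omega),
            ih ((isCompletedGo tree fA (i + 1)).2 + 1) (by omega) (by omega) fB' pending
              (flag && (isCompletedGo tree fA (i + 1)).1)
              (isCompletedGo tree fA (i + 1)).2 hp (by omega) g (by omega)]
        simp [Bool.and_assoc]

-- ===== VERDICT (by name: the statement is the Claim_ definition above) =====
theorem is_completed_spec : Claim_equal_is_completed := by
  intro tree start _dom hpre
  unfold Spec_is_completed is_completed is_completed_alt
  set k := ((tree.length : Int) - start).toNat with hk
  rcases hpre with hlen | hD | ⟨hlo, good⟩
  · have hz : k = 0 := by omega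
    rw [hz]
    simp [isCompletedGo, altGo, hlen]
  · obtain ⟨node, hnode, hrole⟩ : ∃ node, PySem.List.pyGet? tree start = some node ∧
        node.lookup "role" = some "D" := by
      cases h : PySem.List.pyGet? tree start with
      | some node => exact ⟨node, rfl, by simpa [h] using hD⟩
      | none => simp [h] at hD
    have hlen : ¬ (tree.length : Int) ≤ start := by
      intro h
      have : PySem.List.pyGet? tree start = none := by
        rw [PySem.List.pyGet?_eq_none_iff]
        unfold PySem.Raise.InRange; omega
      simp [this] at hnode
    have hDr : pvRoleAt tree start = "D" := by simp [pvRoleAt, hnode, hrole]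
    obtain ⟨m, hm⟩ : ∃ m, 2 * k + 2 = (m + 1) + 1 := ⟨2 * k, by ring⟩
    rw [hm]
    simp [isCompletedGo, altGo, hlen, hDr]
  · have hmain := altGo_step tree good (k + 1) start hlo (by push_cast; omega)
      (2 * k + 2) 0 true start (le_refl _) (by push_cast; omega)
      (2 * (((tree.length : Int) - ((isCompletedGo tree (k + 1) start).2 + 1)).toNat) + 1)
      (by push_cast; omega)
    rw [show (0 : Int) + 1 = 1 by ring] at hmain
    rw [hmain]
    simp [altGo]
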